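-- pv_equiv track=rewrite | github.com/c940606/leetcode | 395. Longest Substring with At Least K Repeating Characters.py | longestSubstring2
-- ===== SOURCE A (Python) =====
-- from collections import Counter
--
-- def longestSubstring2(s: str, k: int) -> int:
--     n = len(s)
--     def helper(s, k, i):
--         left, right = 0, 0
--         special = 0
--         more_k_num = 0
--         lookup = Counter()
--         res = 0
--         while right < n:
--             lookup[s[right]] += 1
--             if lookup[s[right]] == 1:
--                 special += 1
--             if lookup[s[right]] == k:
--                 more_k_num += 1
--             while special > i:
--                 lookup[s[left]] -= 1
--                 if lookup[s[left]] == 0: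
--                     special -= 1
--                 if lookup[s[left]] == k - 1:
--                     more_k_num -= 1
--                 left += 1
--             if special == more_k_num:
--                 res = max(res, right - left + 1)
--             right += 1
--         return res
--
--     return max(helper(s, k, i) for i in range(1, 27))
-- ===== SOURCE B (Python) =====
-- def longestSubstring2(s: str, k: int) -> int:
--     # Brute force: try every substring, keep the longest in which
--     # every character occurs at least k times.
--     best = 0
--     n = len(s)
--     for i in range(n):
--         for j in range(i + 1, n + 1):
--             sub = s[i:j]
--             if j - i > best and all(sub.count(c) >= k for c in sub):
--                 best = j - i
--     return best
-- ===== Notes on version B (the rewrite author's own statement) =====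
-- stated objective: simpler
-- what changed: A runs 26 separate sliding-window passes (one per allowed number of distinct characters) with incremental counter/distinct/at-least-k bookkeeping; B is a plain brute force that checks every substring directly, which is far shorter and obviously correct.
-- outside the precondition, e.g. on longestSubstring2('ab', 0): A returns 0, B returns 2; on longestSubstring2('abcdefghijklmnopqrstuvwxyz0', 1): A returns 26, B returns 27
import Mathlib
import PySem

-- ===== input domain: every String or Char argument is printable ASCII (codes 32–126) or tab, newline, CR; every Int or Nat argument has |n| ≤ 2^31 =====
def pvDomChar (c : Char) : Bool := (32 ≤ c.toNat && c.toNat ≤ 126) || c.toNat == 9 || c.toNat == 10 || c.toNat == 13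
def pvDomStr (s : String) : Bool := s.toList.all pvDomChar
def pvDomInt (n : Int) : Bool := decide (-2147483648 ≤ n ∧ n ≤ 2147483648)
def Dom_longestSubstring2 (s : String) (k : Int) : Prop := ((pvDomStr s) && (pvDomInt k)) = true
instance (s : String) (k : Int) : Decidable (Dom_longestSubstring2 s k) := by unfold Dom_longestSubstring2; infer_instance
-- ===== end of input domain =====

-- B replaces A's 26 incremental sliding-window passes by a plain check of every
-- substring: much shorter and obviously correct (objective: simpler; not faster).

-- ===== PORT A =====
-- loop state of A's helper: (left, lookup, special, more_k_num, res)
structure PvStA where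
  left : Int
  lookup : PySem.Dict Char Int
  sp : Int
  mkk : Int
  res : Int
deriving Repr

-- the inner `while special > i` loop; fuel = n iterations always suffices
-- (each iteration advances `left`, and the loop stops once the window is empty,
-- so it runs at most n times per entry); `s[left]` is always in range when the
-- loop body runs, so pyGetD's default ' ' is never read.
def pvShrink (l : List Char) (k i : Int) : Nat → PvStA → PvStA
  | 0, st => st
  | fuel+1, st =>
    if i < st.sp then
      let c := PySem.List.pyGetD l st.left ' '
      let v := st.lookup.getD c 0 - 1                    -- lookup[s[left]] -= 1
      let lk := st.lookup.insert c v
      let sp := if v = 0 then st.sp - 1 else st.sp       -- if lookup[s[left]] == 0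
      let mk := if v = k - 1 then st.mkk - 1 else st.mkk   -- if lookup[s[left]] == k-1
      pvShrink l k i fuel ⟨st.left + 1, lk, sp, mk, st.res⟩
    else st

-- one iteration of the outer `while right < n` loop
def pvStepA (l : List Char) (n : Nat) (k i : Int) (st : PvStA) (right : Nat) : PvStA :=
  let c := PySem.List.pyGetD l (right : Int) ' '         -- s[right], always in range
  let v := st.lookup.getD c 0 + 1                        -- lookup[s[right]] += 1
  let st1 : PvStA :=
    ⟨st.left, st.lookup.insert c v,
     (if v = 1 then st.sp + 1 else st.sp),               -- if lookup[s[right]] == 1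
     (if v = k then st.mkk + 1 else st.mkk),               -- if lookup[s[right]] == k
     st.res⟩
  let st2 := pvShrink l k i n st1
  if st2.sp = st2.mkk then
    ⟨st2.left, st2.lookup, st2.sp, st2.mkk, max st2.res ((right : Int) - st2.left + 1)⟩
  else st2

def pvHelper (l : List Char) (n : Nat) (k i : Int) : Int :=
  ((List.range n).foldl (pvStepA l n k i) ⟨0, PySem.Dict.empty, 0, 0, 0⟩).res

def longestSubstring2 (s : String) (k : Int) : Int :=
  let l := s.toList
  let n := l.length
  -- max(helper(s, k, i) for i in range(1, 27)); the range is nonempty so the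
  -- Option default 0 is never used
  (PySem.List.max? ((PySem.List.pyRange 1 27 1).map (fun i => pvHelper l n k i))
    (fun x => x)).getD 0

-- ===== PORT B =====
def longestSubstring2_alt (s : String) (k : Int) : Int :=
  let l := s.toList
  let n : Int := (l.length : Int)
  (PySem.List.pyRange 0 n 1).foldl (fun best i =>
    (PySem.List.pyRange (i + 1) (n + 1) 1).foldl (fun best j =>
      let sub := PySem.List.slice l (some i) (some j)
      if j - i > best ∧ (∀ c ∈ sub, k ≤ (sub.count c : Int)) then j - i else best)
      best) 0

-- ===== PRECONDITION & SPEC =====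
-- Pre_ restricts to the problem's natural domain (LeetCode 395 guarantees s is
-- lowercase letters and k ≥ 1): it excludes k < 1, where A's `== k` trigger never
-- fires and it returns 0 regardless of s, and strings with more than 26 distinct
-- characters, where A's hard-coded `range(1, 27)` caps the windows it considers;
-- B returns the true maximum in both cases.
def Pre_longestSubstring2 (s : String) (k : Int) : Prop :=
  1 ≤ k ∧ s.toList.dedup.length ≤ 26
instance (s : String) (k : Int) : Decidable (Pre_longestSubstring2 s k) := by
  unfold Pre_longestSubstring2; infer_instance
def pvWitness_longestSubstring2 : String × Int := ("ababbc", 2)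

def Spec_longestSubstring2 (s : String) (k : Int) (out : Int) : Prop := out = longestSubstring2_alt s k
instance (s : String) (k : Int) (out : Int) : Decidable (Spec_longestSubstring2 s k out) := by unfold Spec_longestSubstring2; infer_instance

-- ===== CLAIM (what is proved, stated in full; the proofs are below) =====
def Claim_equal_longestSubstring2 : Prop := ∀ (s : String) (k : Int), Dom_longestSubstring2 s k → Pre_longestSubstring2 s k → Spec_longestSubstring2 s k (longestSubstring2 s k)

-- ===== LEMMAS AND PROOFS =====

-- the contiguous window s[a:b]
def pvSub (l : List Char) (a b : Nat) : List Char := (l.drop a).take (b - a)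
-- every character of w occurs at least k times in w
abbrev pvValid (k : Int) (w : List Char) : Prop := ∀ c ∈ w, k ≤ (w.count c : Int)
-- number of distinct characters
def pvDD (w : List Char) : Nat := w.toFinset.card
-- number of distinct characters occurring at least k times
def pvMK (k : Int) (w : List Char) : Nat :=
  (w.toFinset.filter (fun c => k ≤ (w.count c : Int))).card
-- the answer: length of the longest window all of whose characters repeat ≥ k times
def pvBest (l : List Char) (k : Int) : Nat :=
  Finset.sup (Finset.range (l.length + 1) ×ˢ Finset.range (l.length + 1))
    (fun p => if p.1 ≤ p.2 ∧ pvValid k (pvSub l p.1 p.2) then p.2 - p.1 else 0)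

-- ---- window arithmetic ----
lemma pvSub_nil (l : List Char) (a : Nat) : pvSub l a a = [] := by
  simp [pvSub]

lemma pvSub_snoc (l : List Char) (a b : Nat) (hab : a ≤ b) (hb : b < l.length) :
    pvSub l a (b + 1) = pvSub l a b ++ [l[b]] := by
  unfold pvSub
  have h1 : b + 1 - a = (b - a) + 1 := by omega
  rw [h1, List.take_add_one]
  have h2 : (l.drop a)[b - a]? = some l[b] := by
    rw [List.getElem?_drop]
    have : a + (b - a) = b := by omega
    rw [this, List.getElem?_eq_getElem hb]
  rw [h2]
  simp

lemma pvSub_cons (l : List Char) (a b : Nat) (hab : a < b) (ha : a < l.length) :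
    pvSub l a b = l[a] :: pvSub l (a + 1) b := by
  unfold pvSub
  rw [List.drop_eq_getElem_cons ha]
  have h1 : b - a = (b - (a + 1)) + 1 := by omega
  rw [h1, List.take_succ_cons]

lemma pvSub_append (l : List Char) (a b c : Nat) (h1 : a ≤ b) (h2 : b ≤ c) :
    pvSub l a c = pvSub l a b ++ pvSub l b c := by
  unfold pvSub
  have h3 : c - a = (b - a) + (c - b) := by omega
  rw [h3, List.take_add]
  congr 1
  rw [List.drop_drop]
  congr 2
  omega

lemma pvSub_length (l : List Char) (a b : Nat) (_hab : a ≤ b) (hb : b ≤ l.length) :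
    (pvSub l a b).length = b - a := by
  simp [pvSub]; omega

lemma pvSub_subset (l : List Char) (a b : Nat) : pvSub l a b ⊆ l := by
  intro x hx
  exact List.mem_of_mem_drop (List.mem_of_mem_take hx)

-- ---- counting transitions ----
lemma pvDD_mono {w v : List Char} (h : w ⊆ v) : pvDD w ≤ pvDD v := by
  exact Finset.card_le_card (fun x hx => by
    simp only [List.mem_toFinset] at *; exact h hx)

lemma pvValid_iff (k : Int) (w : List Char) : pvValid k w ↔ pvMK k w = pvDD w := by
  unfold pvMK pvDD
  constructor
  · intro hv
    rw [Finset.filter_eq_self.mpr]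
    intro c hc
    exact hv c (List.mem_toFinset.mp hc)
  · intro h
    intro c hc
    have hsub : w.toFinset.filter (fun c => k ≤ (w.count c : Int)) ⊆ w.toFinset :=
      Finset.filter_subset _ _
    have heq := Finset.eq_of_subset_of_card_le hsub h.ge
    have : c ∈ w.toFinset.filter (fun c => k ≤ (w.count c : Int)) := by
      rw [heq]; exact List.mem_toFinset.mpr hc
    exact (Finset.mem_filter.mp this).2

-- master transition: w has the same characters as t plus one more occurrence of x
lemma pvDD_add (t : List Char) (x : Char) (w : List Char)
    (hfin : w.toFinset = insert x t.toFinset) :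
    pvDD w = pvDD t + (if (t.count x : Int) = 0 then 1 else 0) := by
  unfold pvDD
  rw [hfin]
  by_cases hx : x ∈ t
  · have h0 : 0 < t.count x := List.count_pos_iff.mpr hx
    have hne : ¬ ((t.count x : Int) = 0) := by
      intro hcontra; rw [Nat.cast_eq_zero] at hcontra; omega
    rw [Finset.insert_eq_self.mpr (List.mem_toFinset.mpr hx), if_neg hne]
    omega
  · have h0 : t.count x = 0 := List.count_eq_zero.mpr hx
    rw [Finset.card_insert_of_notMem (fun h => hx (List.mem_toFinset.mp h)),
      if_pos (by simp [h0])]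

lemma pvMK_add (k : Int) (hk : 1 ≤ k) (t : List Char) (x : Char) (w : List Char)
    (hfin : w.toFinset = insert x t.toFinset)
    (hcx : w.count x = t.count x + 1)
    (hc : ∀ c, c ≠ x → w.count c = t.count c) :
    pvMK k w = pvMK k t + (if (t.count x : Int) + 1 = k then 1 else 0) := by
  have hcxi : (w.count x : Int) = (t.count x : Int) + 1 := by exact_mod_cast hcx
  have hci : ∀ c, c ≠ x → (w.count c : Int) = (t.count c : Int) := fun c h => by
    exact_mod_cast hc c h
  have hnn : (0 : Int) ≤ (t.count x : Int) := Int.natCast_nonneg _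
  unfold pvMK
  rw [hfin]
  by_cases hx : x ∈ t
  · have hxS : x ∈ t.toFinset := List.mem_toFinset.mpr hx
    set T := t.toFinset.erase x with hTdef
    have hxT : x ∉ T := Finset.notMem_erase _ _
    have h1 : insert x t.toFinset = insert x T := by
      rw [Finset.insert_eq_self.mpr hxS]
      exact (Finset.insert_erase hxS).symm
    have h2 : t.toFinset = insert x T := (Finset.insert_erase hxS).symm
    have hfil : T.filter (fun c => k ≤ (w.count c : Int)) =
        T.filter (fun c => k ≤ (t.count c : Int)) :=
      Finset.filter_congr (fun c hcT => by rw [hci c (Finset.mem_erase.mp hcT).1])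
    have hL : ((insert x t.toFinset).filter (fun c => k ≤ (w.count c : Int))).card
        = (T.filter (fun c => k ≤ (t.count c : Int))).card
          + (if k ≤ (w.count x : Int) then 1 else 0) := by
      rw [h1, Finset.filter_insert, hfil]
      split_ifs
      · rw [Finset.card_insert_of_notMem (fun hmem => hxT (Finset.mem_of_mem_filter _ hmem))]
      · simp
    have hR : (t.toFinset.filter (fun c => k ≤ (t.count c : Int))).card
        = (T.filter (fun c => k ≤ (t.count c : Int))).card
          + (if k ≤ (t.count x : Int) then 1 else 0) := by
      conv_lhs => rw [h2]
      rw [Finset.filter_insert]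
      split_ifs
      · rw [Finset.card_insert_of_notMem (fun hmem => hxT (Finset.mem_of_mem_filter _ hmem))]
      · simp
    rw [hL, hR]
    split_ifs <;> omega
  · have hxS : x ∉ t.toFinset := fun h => hx (List.mem_toFinset.mp h)
    have hc0 : (t.count x : Int) = 0 := by
      rw [Nat.cast_eq_zero]; exact List.count_eq_zero.mpr hx
    have hfil : t.toFinset.filter (fun c => k ≤ (w.count c : Int)) =
        t.toFinset.filter (fun c => k ≤ (t.count c : Int)) :=
      Finset.filter_congr (fun c hcT => by
        rw [hci c (fun hcx' => hxS (hcx' ▸ hcT))])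
    rw [Finset.filter_insert, hfil]
    by_cases hq : k ≤ (w.count x : Int)
    · rw [if_pos hq, Finset.card_insert_of_notMem
        (fun hmem => hxS (Finset.mem_of_mem_filter _ hmem)),
        if_pos (by omega : (t.count x : Int) + 1 = k)]
    · rw [if_neg hq, if_neg (by omega : ¬ ((t.count x : Int) + 1 = k))]
      omega

-- ---- pvBest characterisation ----
lemma pvBest_ge (l : List Char) (k : Int) (i j : Nat) (hij : i ≤ j) (hj : j ≤ l.length)
    (hv : pvValid k (pvSub l i j)) : j - i ≤ pvBest l k := by
  have hmem : (i, j) ∈ Finset.range (l.length + 1) ×ˢ Finset.range (l.length + 1) := by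
    rw [Finset.mem_product, Finset.mem_range, Finset.mem_range]
    omega
  have h := Finset.le_sup (f := fun p : Nat × Nat =>
    if p.1 ≤ p.2 ∧ pvValid k (pvSub l p.1 p.2) then p.2 - p.1 else 0) hmem
  simp only [] at h
  rw [if_pos ⟨hij, hv⟩] at h
  exact h

lemma pvBest_achieved (l : List Char) (k : Int) (h : pvBest l k ≠ 0) :
    ∃ i j, i ≤ j ∧ j ≤ l.length ∧ pvValid k (pvSub l i j) ∧ j - i = pvBest l k := by
  obtain ⟨p, hp, hsup⟩ := Finset.exists_mem_eq_sup
    (Finset.range (l.length + 1) ×ˢ Finset.range (l.length + 1))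
    ⟨(0, 0), by simp⟩
    (fun p : Nat × Nat => if p.1 ≤ p.2 ∧ pvValid k (pvSub l p.1 p.2) then p.2 - p.1 else 0)
  rw [Finset.mem_product, Finset.mem_range, Finset.mem_range] at hp
  unfold pvBest at h ⊢
  rw [hsup] at h ⊢
  split_ifs at h ⊢ with hcond
  · exact ⟨p.1, p.2, hcond.1, by omega, hcond.2, rfl⟩
  · exact absurd rfl h

-- ---- A-side loop invariant ----
def pvInv (l : List Char) (k i : Int) (e : Nat) (st : PvStA) : Prop :=
  ∃ L0 : Nat, st.left = (L0 : Int) ∧ L0 ≤ e ∧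
    (∀ c : Char, st.lookup.getD c 0 = ((pvSub l L0 e).count c : Int)) ∧
    st.sp = (pvDD (pvSub l L0 e) : Int) ∧
    st.mkk = (pvMK k (pvSub l L0 e) : Int) ∧
    st.sp ≤ i ∧
    0 ≤ st.res ∧ st.res ≤ (pvBest l k : Int) ∧
    (∀ m : Nat, m < L0 → i < (pvDD (pvSub l m e) : Int)) ∧
    (∀ i0 j0 : Nat, i0 ≤ j0 → j0 ≤ e → pvValid k (pvSub l i0 j0) →
      (pvDD (pvSub l i0 j0) : Int) = i → (j0 : Int) - (i0 : Int) ≤ st.res)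

lemma pvShrink_spec (l : List Char) (k i : Int) (hk : 1 ≤ k) (hi : 1 ≤ i)
    (e : Nat) (he : e ≤ l.length) :
    ∀ (fuel : Nat) (st : PvStA) (L0 : Nat), st.left = (L0 : Int) → L0 ≤ e →
    (∀ c : Char, st.lookup.getD c 0 = ((pvSub l L0 e).count c : Int)) →
    st.sp = (pvDD (pvSub l L0 e) : Int) →
    st.mkk = (pvMK k (pvSub l L0 e) : Int) →
    (∀ m : Nat, m < L0 → i < (pvDD (pvSub l m e) : Int)) →
    e - L0 ≤ fuel →
    ∃ L1 : Nat, L0 ≤ L1 ∧ L1 ≤ e ∧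
      (pvShrink l k i fuel st).left = (L1 : Int) ∧
      (∀ c : Char, (pvShrink l k i fuel st).lookup.getD c 0 = ((pvSub l L1 e).count c : Int)) ∧
      (pvShrink l k i fuel st).sp = (pvDD (pvSub l L1 e) : Int) ∧
      (pvShrink l k i fuel st).mkk = (pvMK k (pvSub l L1 e) : Int) ∧
      (pvShrink l k i fuel st).sp ≤ i ∧
      (∀ m : Nat, m < L1 → i < (pvDD (pvSub l m e) : Int)) ∧
      (pvShrink l k i fuel st).res = st.res := by
  intro fuel
  induction fuel with
  | zero =>
    intro st L0 hleft hle hcnt hsp hmk hg hfuel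
    have hL0e : L0 = e := by omega
    subst hL0e
    refine ⟨L0, le_refl _, le_refl _, hleft, hcnt, hsp, hmk, ?_, hg, rfl⟩
    show st.sp ≤ i
    rw [hsp, pvSub_nil]
    simp only [pvDD, List.toFinset_nil, Finset.card_empty, Nat.cast_zero]
    omega
  | succ fuel ih =>
    intro st L0 hleft hle hcnt hsp hmk hg hfuel
    rw [pvShrink]
    by_cases hcond : i < st.sp
    · rw [if_pos hcond]
      -- the window is nonempty
      have hL0e : L0 < e := by
        rcases Nat.lt_or_ge L0 e with h | h
        · exact h
        · exfalso
          have : L0 = e := by omega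
          subst this
          rw [pvSub_nil] at hsp
          simp only [pvDD, List.toFinset_nil, Finset.card_empty, Nat.cast_zero] at hsp
          omega
      have hL0l : L0 < l.length := by omega
      have hw : pvSub l L0 e = l[L0] :: pvSub l (L0 + 1) e := pvSub_cons l L0 e hL0e hL0l
      set x := l[L0] with hxdef
      set t := pvSub l (L0 + 1) e with htdef
      have hcx : (pvSub l L0 e).count x = t.count x + 1 := by
        rw [hw, List.count_cons_self]
      have hcne : ∀ c, c ≠ x → (pvSub l L0 e).count c = t.count c := by
        intro c hcne'
        rw [hw]
        simp [List.count_cons]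
        exact fun h => hcne' h.symm
      have hfin : (pvSub l L0 e).toFinset = insert x t.toFinset := by
        rw [hw, List.toFinset_cons]
      -- the character read is l[L0]
      have hcread : PySem.List.pyGetD l st.left ' ' = x := by
        rw [hleft, PySem.List.pyGetD_natCast, List.getD_eq_getElem l ' ' hL0l]
      have hDDw := pvDD_add t x (pvSub l L0 e) hfin
      have hMKw := pvMK_add k hk t x (pvSub l L0 e) hfin hcx hcne
      have hv : st.lookup.getD x 0 - 1 = (t.count x : Int) := by
        rw [hcnt x, hcx]
        push_cast
        ring
      -- apply the induction hypothesis to the advanced state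
      have happ := ih
        ⟨st.left + 1,
         st.lookup.insert (PySem.List.pyGetD l st.left ' ') (st.lookup.getD (PySem.List.pyGetD l st.left ' ') 0 - 1),
         (if st.lookup.getD (PySem.List.pyGetD l st.left ' ') 0 - 1 = 0 then st.sp - 1 else st.sp),
         (if st.lookup.getD (PySem.List.pyGetD l st.left ' ') 0 - 1 = k - 1 then st.mkk - 1 else st.mkk),
         st.res⟩
        (L0 + 1) ?_ (by omega) ?_ ?_ ?_ ?_ (by omega)
      · obtain ⟨L1, h1, h2, h3, h4, h5, h6, h7, h8, h9⟩ := happ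
        exact ⟨L1, by omega, h2, h3, h4, h5, h6, h7, h8, h9⟩
      · show st.left + 1 = ((L0 + 1 : Nat) : Int)
        rw [hleft]; push_cast; ring
      · intro c
        show (st.lookup.insert (PySem.List.pyGetD l st.left ' ')
          (st.lookup.getD (PySem.List.pyGetD l st.left ' ') 0 - 1)).getD c 0 = (t.count c : Int)
        rw [hcread, PySem.Dict.getD_insert]
        by_cases hcx' : c = x
        · rw [if_pos hcx', hcx']
          exact hv
        · rw [if_neg hcx', hcnt c, hcne c hcx']
      · show (if st.lookup.getD (PySem.List.pyGetD l st.left ' ') 0 - 1 = 0 then st.sp - 1 else st.sp)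
          = (pvDD t : Int)
        rw [hcread, hv, hsp, hDDw]
        by_cases h0 : (t.count x : Int) = 0
        · rw [if_pos h0, if_pos h0]; push_cast; ring
        · rw [if_neg h0, if_neg h0]; push_cast; ring
      · show (if st.lookup.getD (PySem.List.pyGetD l st.left ' ') 0 - 1 = k - 1 then st.mkk - 1 else st.mkk)
          = (pvMK k t : Int)
        rw [hcread, hv, hmk, hMKw]
        by_cases h0 : (t.count x : Int) = k - 1
        · rw [if_pos h0, if_pos (by omega : (t.count x : Int) + 1 = k)]; push_cast; ring
        · rw [if_neg h0, if_neg (by omega : ¬ ((t.count x : Int) + 1 = k))]; push_cast; ring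
      · intro m hm
        rcases Nat.lt_or_ge m L0 with h | h
        · exact hg m h
        · have : m = L0 := by omega
          subst this
          rw [← hsp]
          exact hcond
    · rw [if_neg hcond]
      exact ⟨L0, le_refl _, hle, hleft, hcnt, hsp, hmk, not_lt.mp hcond, hg, rfl⟩

lemma pvLoop_inv (l : List Char) (k i : Int) (hk : 1 ≤ k) (hi : 1 ≤ i) :
    ∀ r : Nat, r ≤ l.length →
      pvInv l k i r ((List.range r).foldl (pvStepA l l.length k i) ⟨0, PySem.Dict.empty, 0, 0, 0⟩) := by
  intro r
  induction r with
  | zero =>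
    intro _
    rw [List.range_zero, List.foldl_nil]
    refine ⟨0, by norm_num, le_refl 0, ?_, ?_, ?_, by show (0 : Int) ≤ i; omega, le_refl 0, Int.natCast_nonneg _, ?_, ?_⟩
    · intro c
      show PySem.Dict.empty.getD c 0 = ((pvSub l 0 0).count c : Int)
      rw [PySem.Dict.getD_empty, pvSub_nil]
      simp
    · show (0 : Int) = (pvDD (pvSub l 0 0) : Int)
      rw [pvSub_nil]
      simp [pvDD]
    · show (0 : Int) = (pvMK k (pvSub l 0 0) : Int)
      rw [pvSub_nil]
      simp [pvMK]
    · intro m hm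
      omega
    · intro i0 j0 h1 h2 _ _
      show (j0 : Int) - (i0 : Int) ≤ 0
      omega
  | succ r ih =>
    intro hr1
    have hrlen : r < l.length := by omega
    have hst := ih (by omega)
    rw [List.range_succ, List.foldl_append, List.foldl_cons, List.foldl_nil]
    set st := (List.range r).foldl (pvStepA l l.length k i) ⟨0, PySem.Dict.empty, 0, 0, 0⟩ with hstdef
    obtain ⟨L0, hleft, hle, hcnt, hsp, hmk, hspi, hres0, hresB, hg, hh⟩ := hst
    rw [pvStepA]
    set x := l[r] with hxdef
    have hcread : PySem.List.pyGetD l ((r : Nat) : Int) ' ' = x := by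
      rw [PySem.List.pyGetD_natCast, List.getD_eq_getElem l ' ' hrlen]
    have hw : pvSub l L0 (r + 1) = pvSub l L0 r ++ [x] := pvSub_snoc l L0 r hle hrlen
    have hfin : (pvSub l L0 (r + 1)).toFinset = insert x (pvSub l L0 r).toFinset := by
      rw [hw, List.toFinset_append]
      simp
    have hcx : (pvSub l L0 (r + 1)).count x = (pvSub l L0 r).count x + 1 := by
      rw [hw, List.count_append]
      simp
    have hcne : ∀ c, c ≠ x → (pvSub l L0 (r + 1)).count c = (pvSub l L0 r).count c := by
      intro c hne
      rw [hw, List.count_append]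
      simp [List.count_singleton]
      exact fun h => hne h.symm
    have hDD := pvDD_add (pvSub l L0 r) x (pvSub l L0 (r + 1)) hfin
    have hMK := pvMK_add k hk (pvSub l L0 r) x (pvSub l L0 (r + 1)) hfin hcx hcne
    have hv : st.lookup.getD x 0 + 1 = ((pvSub l L0 (r + 1)).count x : Int) := by
      rw [hcnt x, hcx]
      push_cast
      ring
    -- the state after the counter update, before the inner while loop
    have hcnt1 : ∀ c : Char, (st.lookup.insert (PySem.List.pyGetD l ((r : Nat) : Int) ' ')
        (st.lookup.getD (PySem.List.pyGetD l ((r : Nat) : Int) ' ') 0 + 1)).getD c 0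
        = ((pvSub l L0 (r + 1)).count c : Int) := by
      intro c
      rw [hcread, PySem.Dict.getD_insert]
      by_cases hcx' : c = x
      · rw [if_pos hcx', hcx']
        exact hv
      · rw [if_neg hcx', hcnt c, hcne c hcx']
    have hsp1 : (if st.lookup.getD (PySem.List.pyGetD l ((r : Nat) : Int) ' ') 0 + 1 = 1
        then st.sp + 1 else st.sp) = (pvDD (pvSub l L0 (r + 1)) : Int) := by
      rw [hcread, hcnt x, hsp, hDD]
      by_cases h0 : ((pvSub l L0 r).count x : Int) = 0
      · rw [if_pos (by omega), if_pos h0]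
        push_cast
        ring
      · rw [if_neg (by omega), if_neg h0]
        push_cast
        ring
    have hmk1 : (if st.lookup.getD (PySem.List.pyGetD l ((r : Nat) : Int) ' ') 0 + 1 = k
        then st.mkk + 1 else st.mkk) = (pvMK k (pvSub l L0 (r + 1)) : Int) := by
      rw [hcread, hcnt x, hmk, hMK]
      by_cases h0 : ((pvSub l L0 r).count x : Int) + 1 = k
      · rw [if_pos (by omega), if_pos h0]
        push_cast
        ring
      · rw [if_neg (by omega), if_neg h0]
        push_cast
        ring
    have hg1 : ∀ m : Nat, m < L0 → i < (pvDD (pvSub l m (r + 1)) : Int) := by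
      intro m hm
      have hsub : pvSub l m r ⊆ pvSub l m (r + 1) := by
        rw [pvSub_snoc l m r (by omega) hrlen]
        exact List.subset_append_left _ _
      have := hg m hm
      have hmono := pvDD_mono hsub
      omega
    have hshr := pvShrink_spec l k i hk hi (r + 1) (by omega) l.length
      ⟨st.left, st.lookup.insert (PySem.List.pyGetD l ((r : Nat) : Int) ' ')
          (st.lookup.getD (PySem.List.pyGetD l ((r : Nat) : Int) ' ') 0 + 1),
       (if st.lookup.getD (PySem.List.pyGetD l ((r : Nat) : Int) ' ') 0 + 1 = 1 then st.sp + 1 else st.sp),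
       (if st.lookup.getD (PySem.List.pyGetD l ((r : Nat) : Int) ' ') 0 + 1 = k then st.mkk + 1 else st.mkk),
       st.res⟩
      L0 hleft (by omega) hcnt1 hsp1 hmk1 hg1 (by omega)
    -- unpack the result of the inner loop
    obtain ⟨L1, hL01, hL1e, h3, h4, h5, h6, h7, h8, h9⟩ := hshr
    set st2 := pvShrink l k i l.length _ with hst2def
    -- L1 ≤ i0 for any window of distinct-count i ending at r+1
    have hL1le : ∀ i0 j0 : Nat, i0 ≤ j0 → j0 = r + 1 → pvValid k (pvSub l i0 j0) →
        (pvDD (pvSub l i0 j0) : Int) = i → L1 ≤ i0 ∧ pvValid k (pvSub l L1 (r + 1)) ∧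
          ((r : Int) + 1) - (L1 : Int) ≥ (j0 : Int) - (i0 : Int) := by
      intro i0 j0 hij0 hj0 hval hdd
      subst hj0
      have hL1i0 : L1 ≤ i0 := by
        by_contra hcon
        have := h8 i0 (by omega)
        omega
      have hsplit : pvSub l L1 (r + 1) = pvSub l L1 i0 ++ pvSub l i0 (r + 1) :=
        pvSub_append l L1 i0 (r + 1) hL1i0 (by omega)
      have hsub : pvSub l i0 (r + 1) ⊆ pvSub l L1 (r + 1) := by
        rw [hsplit]
        exact List.subset_append_right _ _
      have hddle : pvDD (pvSub l i0 (r + 1)) ≤ pvDD (pvSub l L1 (r + 1)) := pvDD_mono hsub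
      have hddge : (pvDD (pvSub l L1 (r + 1)) : Int) ≤ i := by rw [← h5]; exact h7
      have hddeq : pvDD (pvSub l L1 (r + 1)) = pvDD (pvSub l i0 (r + 1)) := by omega
      have hfs : (pvSub l i0 (r + 1)).toFinset = (pvSub l L1 (r + 1)).toFinset := by
        apply Finset.eq_of_subset_of_card_le
        · intro c hc
          rw [List.mem_toFinset] at hc ⊢
          exact hsub hc
        · exact le_of_eq hddeq
      have hvalW : pvValid k (pvSub l L1 (r + 1)) := by
        intro c hc
        have hcin : c ∈ pvSub l i0 (r + 1) := by
          have hmem : c ∈ (pvSub l L1 (r + 1)).toFinset := List.mem_toFinset.mpr hc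
          rw [← hfs] at hmem
          exact List.mem_toFinset.mp hmem
        have hcle : (pvSub l i0 (r + 1)).count c ≤ (pvSub l L1 (r + 1)).count c := by
          rw [hsplit, List.count_append]
          omega
        have := hval c hcin
        have hc2 : ((pvSub l i0 (r + 1)).count c : Int) ≤ ((pvSub l L1 (r + 1)).count c : Int) := by
          exact_mod_cast hcle
        omega
      exact ⟨hL1i0, hvalW, by omega⟩
    by_cases hbr : st2.sp = st2.mkk
    · rw [if_pos hbr]
      refine ⟨L1, h3, by omega, h4, h5, h6, h7, ?_, ?_, h8, ?_⟩
      · show 0 ≤ max st2.res (((r : Nat) : Int) - st2.left + 1)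
        rw [h9]
        exact le_trans hres0 (le_max_left _ _)
      · show max st2.res (((r : Nat) : Int) - st2.left + 1) ≤ (pvBest l k : Int)
        have hvalW : pvValid k (pvSub l L1 (r + 1)) := by
          rw [pvValid_iff]
          have : (pvMK k (pvSub l L1 (r + 1)) : Int) = (pvDD (pvSub l L1 (r + 1)) : Int) := by
            rw [← h5, ← h6, hbr]
          exact_mod_cast this
        have hcand : (r + 1) - L1 ≤ pvBest l k :=
          pvBest_ge l k L1 (r + 1) hL1e (by omega) hvalW
        rw [h9, h3]
        apply max_le
        · exact hresB
        · omega
      · intro i0 j0 hij0 hj0 hval hdd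
        show (j0 : Int) - (i0 : Int) ≤ max st2.res (((r : Nat) : Int) - st2.left + 1)
        rcases Nat.lt_or_ge j0 (r + 1) with hcase | hcase
        · have := hh i0 j0 hij0 (by omega) hval hdd
          rw [h9]
          exact le_trans this (le_max_left _ _)
        · have hj0eq : j0 = r + 1 := by omega
          obtain ⟨hL1i0, _, hgeq⟩ := hL1le i0 j0 hij0 hj0eq hval hdd
          rw [h3]
          refine le_trans ?_ (le_max_right _ _)
          omega
    · rw [if_neg hbr]
      refine ⟨L1, h3, by omega, h4, h5, h6, h7, ?_, ?_, h8, ?_⟩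
      · rw [h9]; exact hres0
      · rw [h9]; exact hresB
      · intro i0 j0 hij0 hj0 hval hdd
        rcases Nat.lt_or_ge j0 (r + 1) with hcase | hcase
        · have := hh i0 j0 hij0 (by omega) hval hdd
          rw [h9]
          exact this
        · exfalso
          have hj0eq : j0 = r + 1 := by omega
          obtain ⟨_, hvalW, _⟩ := hL1le i0 j0 hij0 hj0eq hval hdd
          rw [pvValid_iff] at hvalW
          apply hbr
          rw [h5, h6, hvalW]

lemma pvHelper_bounds (l : List Char) (k i : Int) (hk : 1 ≤ k) (hi : 1 ≤ i) :
    0 ≤ pvHelper l l.length k i ∧ pvHelper l l.length k i ≤ (pvBest l k : Int) := by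
  obtain ⟨L0, _, _, _, _, _, _, hres0, hresB, _, _⟩ :=
    pvLoop_inv l k i hk hi l.length (le_refl _)
  exact ⟨hres0, hresB⟩

lemma pvHelper_reach (l : List Char) (k i : Int) (hk : 1 ≤ k) (hi : 1 ≤ i)
    (i0 j0 : Nat) (hij : i0 ≤ j0) (hj : j0 ≤ l.length)
    (hv : pvValid k (pvSub l i0 j0)) (hd : (pvDD (pvSub l i0 j0) : Int) = i) :
    (j0 : Int) - (i0 : Int) ≤ pvHelper l l.length k i := by
  obtain ⟨L0, _, _, _, _, _, _, _, _, _, hh⟩ :=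
    pvLoop_inv l k i hk hi l.length (le_refl _)
  exact hh i0 j0 hij hj hv hd

lemma portA_eq (l : List Char) (k : Int) (hk : 1 ≤ k) (h26 : l.dedup.length ≤ 26) :
    (PySem.List.max? ((PySem.List.pyRange 1 27 1).map (fun i => pvHelper l l.length k i))
      (fun x => x)).getD 0 = (pvBest l k : Int) := by
  set xs := (PySem.List.pyRange 1 27 1).map (fun i => pvHelper l l.length k i) with hxs
  have hne : xs ≠ [] := by
    rw [hxs]
    intro hcon
    have := List.map_eq_nil_iff.mp hcon
    have hlen := PySem.List.length_pyRange_one (a := 1) (b := 27)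
    rw [this] at hlen
    simp at hlen
  cases hmax : PySem.List.max? xs (fun x => x) with
  | none => exact absurd ((PySem.List.max?_eq_none_iff xs _).mp hmax) hne
  | some m =>
    have hmem := PySem.List.max?_mem hmax
    have hismax := PySem.List.max?_isMax hmax
    rw [hxs] at hmem
    obtain ⟨iv, hiv, hm⟩ := List.mem_map.mp hmem
    rw [PySem.List.mem_pyRange_one] at hiv
    have hbounds := pvHelper_bounds l k iv hk hiv.1
    have hub : m ≤ (pvBest l k : Int) := by rw [← hm]; exact hbounds.2
    have hlb : (pvBest l k : Int) ≤ m := by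
      by_cases hB : pvBest l k = 0
      · rw [hB, ← hm]
        exact_mod_cast hbounds.1
      · obtain ⟨i0, j0, hij, hjl, hval, hlen⟩ := pvBest_achieved l k hB
        have hi0j0 : i0 < j0 := by omega
        have hnonnil : pvSub l i0 j0 ≠ [] := by
          intro hcon
          have := pvSub_length l i0 j0 hij hjl
          rw [hcon] at this
          simp at this
          omega
        obtain ⟨c0, hc0⟩ := List.exists_mem_of_ne_nil _ hnonnil
        set d := pvDD (pvSub l i0 j0) with hd
        have hd1 : 1 ≤ d := by
          rw [hd]
          unfold pvDD
          exact Finset.card_pos.mpr ⟨c0, List.mem_toFinset.mpr hc0⟩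
        have hd26 : d ≤ 26 := by
          have h1 : pvDD (pvSub l i0 j0) ≤ pvDD l := pvDD_mono (pvSub_subset l i0 j0)
          have h2 : pvDD l = l.dedup.length := List.card_toFinset l
          omega
        have hreach := pvHelper_reach l k ((d : Nat) : Int) hk (by exact_mod_cast hd1)
          i0 j0 (le_of_lt hi0j0) hjl hval rfl
        have hmemd : pvHelper l l.length k ((d : Nat) : Int) ∈ xs := by
          rw [hxs]
          exact List.mem_map.mpr ⟨((d : Nat) : Int), by
            rw [PySem.List.mem_pyRange_one]
            constructor
            · exact_mod_cast hd1
            · exact_mod_cast Nat.lt_succ_of_le hd26, rfl⟩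
        have hle2 : pvHelper l l.length k ((d : Nat) : Int) ≤ m := by
          simpa using hismax _ hmemd
        have hcast : ((j0 : Int) - (i0 : Int)) = (pvBest l k : Int) := by
          omega
        omega
    simp only [Option.getD_some]
    omega

-- ---- generic foldl facts ----
lemma pvFoldl_ge_init {α : Type} (f : Int → α → Int) (hf : ∀ a x, a ≤ f a x) :
    ∀ (xs : List α) (a : Int), a ≤ xs.foldl f a := by
  intro xs
  induction xs with
  | nil => intro a; exact le_refl a
  | cons x xs ih => intro a; exact le_trans (hf a x) (ih (f a x))

lemma pvFoldl_reach {α : Type} (f : Int → α → Int) (hf : ∀ a x, a ≤ f a x)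
    (xs : List α) (x : α) (hx : x ∈ xs) (v : Int) (hv : ∀ a, v ≤ f a x) (a : Int) :
    v ≤ xs.foldl f a := by
  obtain ⟨ys, zs, rfl⟩ := List.append_of_mem hx
  rw [List.foldl_append, List.foldl_cons]
  exact le_trans (hv _) (pvFoldl_ge_init f hf zs _)

lemma pvFoldl_pres {α : Type} (P : Int → Prop) (f : Int → α → Int) (xs : List α)
    (hstep : ∀ a x, x ∈ xs → P a → P (f a x)) :
    ∀ (a : Int), P a → P (xs.foldl f a) := by
  induction xs with
  | nil => intro a ha; exact ha
  | cons x xs ih =>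
    intro a ha
    exact ih (fun a y hy hP => hstep a y (List.mem_cons_of_mem _ hy) hP)
      (f a x) (hstep a x List.mem_cons_self ha)

-- ---- B-side ----
lemma portB_eq (l : List Char) (k : Int) :
    ((PySem.List.pyRange 0 (l.length : Int) 1).foldl (fun best i =>
      (PySem.List.pyRange (i + 1) ((l.length : Int) + 1) 1).foldl (fun best j =>
        let sub := PySem.List.slice l (some i) (some j)
        if j - i > best ∧ (∀ c ∈ sub, k ≤ (sub.count c : Int)) then j - i else best)
        best) 0) = (pvBest l k : Int) := by
  have hstep : ∀ (i : Int) (a : Int) (j : Int),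
      a ≤ (fun best j => let sub := PySem.List.slice l (some i) (some j)
        if j - i > best ∧ (∀ c ∈ sub, k ≤ (sub.count c : Int)) then j - i else best) a j := by
    intro i a j
    dsimp only []
    split_ifs with h
    · exact le_of_lt h.1
    · exact le_refl a
  have houter : ∀ (a : Int) (i : Int),
      a ≤ (fun best i => (PySem.List.pyRange (i + 1) ((l.length : Int) + 1) 1).foldl
        (fun best j => let sub := PySem.List.slice l (some i) (some j)
          if j - i > best ∧ (∀ c ∈ sub, k ≤ (sub.count c : Int)) then j - i else best) best) a i := by
    intro a i
    exact pvFoldl_ge_init _ (hstep i) _ a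
  -- upper bound and nonnegativity
  have hub : 0 ≤ ((PySem.List.pyRange 0 (l.length : Int) 1).foldl (fun best i =>
      (PySem.List.pyRange (i + 1) ((l.length : Int) + 1) 1).foldl (fun best j =>
        let sub := PySem.List.slice l (some i) (some j)
        if j - i > best ∧ (∀ c ∈ sub, k ≤ (sub.count c : Int)) then j - i else best)
        best) 0) ∧ ((PySem.List.pyRange 0 (l.length : Int) 1).foldl (fun best i =>
      (PySem.List.pyRange (i + 1) ((l.length : Int) + 1) 1).foldl (fun best j =>
        let sub := PySem.List.slice l (some i) (some j)
        if j - i > best ∧ (∀ c ∈ sub, k ≤ (sub.count c : Int)) then j - i else best)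
        best) 0) ≤ (pvBest l k : Int) := by
    refine pvFoldl_pres (fun a => 0 ≤ a ∧ a ≤ (pvBest l k : Int)) _ _ ?_ 0
      ⟨le_refl 0, Int.natCast_nonneg _⟩
    intro a i hi ha
    refine pvFoldl_pres (fun a => 0 ≤ a ∧ a ≤ (pvBest l k : Int)) _ _ ?_ a ha
    intro b j hj hb
    rw [PySem.List.mem_pyRange_one] at hi hj
    dsimp only []
    split_ifs with h
    · obtain ⟨hgt, hval⟩ := h
      have hi0 : (0:Int) ≤ i := hi.1
      have hj0 : (0:Int) ≤ j := by omega
      obtain ⟨iN, rfl⟩ : ∃ m : Nat, i = (m : Int) := ⟨i.toNat, (Int.toNat_of_nonneg hi0).symm⟩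
      obtain ⟨jN, rfl⟩ : ∃ m : Nat, j = (m : Int) := ⟨j.toNat, (Int.toNat_of_nonneg hj0).symm⟩
      rw [PySem.List.slice_natCast] at hval
      have hijN : iN ≤ jN := by omega
      have hjN : jN ≤ l.length := by omega
      have := pvBest_ge l k iN jN hijN hjN hval
      constructor
      · omega
      · have : ((jN - iN : Nat) : Int) ≤ (pvBest l k : Int) := by exact_mod_cast this
        omega
    · exact hb
  -- every candidate is reached
  have hreach : ∀ i0 j0 : Nat, i0 ≤ j0 → j0 ≤ l.length → pvValid k (pvSub l i0 j0) →
      ((j0 : Int) - (i0 : Int)) ≤ ((PySem.List.pyRange 0 (l.length : Int) 1).foldl (fun best i =>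
      (PySem.List.pyRange (i + 1) ((l.length : Int) + 1) 1).foldl (fun best j =>
        let sub := PySem.List.slice l (some i) (some j)
        if j - i > best ∧ (∀ c ∈ sub, k ≤ (sub.count c : Int)) then j - i else best)
        best) 0) := by
    intro i0 j0 hij hjl hval
    rcases Nat.eq_or_lt_of_le hij with heq | hlt
    · subst heq
      have := hub.1
      omega
    · apply pvFoldl_reach _ houter _ ((i0 : Int)) _ ((j0:Int) - (i0:Int)) _ 0
      · rw [PySem.List.mem_pyRange_one]
        constructor
        · exact Int.natCast_nonneg _
        · exact_mod_cast lt_of_lt_of_le hlt hjl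
      · intro a
        apply pvFoldl_reach _ (hstep _) _ ((j0 : Int)) _ _ _ a
        · rw [PySem.List.mem_pyRange_one]
          constructor
          · exact_mod_cast hlt
          · have : (j0 : Int) ≤ (l.length : Int) := by exact_mod_cast hjl
            omega
        · intro b
          dsimp only []
          rw [PySem.List.slice_natCast]
          by_cases hgt : (j0 : Int) - (i0 : Int) > b
          · rw [if_pos ⟨hgt, hval⟩]
          · rw [if_neg (fun hh => hgt hh.1)]
            omega
  by_cases hB : pvBest l k = 0
  · have h1 := hub.1
    have h2 := hub.2
    rw [hB] at h2
    omega
  · obtain ⟨i0, j0, hij, hjl, hval, hlen⟩ := pvBest_achieved l k hB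
    have hr := hreach i0 j0 hij hjl hval
    have h2 := hub.2
    omega

-- ===== VERDICT (by name: the statement is the Claim_ definition above) =====
theorem longestSubstring2_spec : Claim_equal_longestSubstring2 := by
  intro s k _hdom hpre
  obtain ⟨hk, h26⟩ := hpre
  show longestSubstring2 s k = longestSubstring2_alt s k
  unfold longestSubstring2 longestSubstring2_alt
  rw [portA_eq s.toList k hk h26, portB_eq s.toList k]
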